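-- pv_equiv track=rewrite | github.com/Dining-together/Algorithm-study | jifrozen/그리디/무지의_먹방_라이브.py | solution
-- ===== SOURCE A (Python) =====
-- from operator import itemgetter
--
-- def solution(food_times, k):
--     foods = []
--     for i in range(len(food_times)):
--         foods.append([food_times[i], i])
--
--     foods.sort()
--     pretime = 0
--     n = len(food_times)
--     for i in range(len(food_times)):
--         time = foods[i][0] - pretime
--         if time != 0:
--             spend = time * n
--             if spend <= k:
--                 k -= spend
--                 pretime = foods[i][0]
--             else:
--                 k %= n
--                 sublist = sorted(foods[i:], key=itemgetter(1))
--                 return sublist[k][1]+1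
--         n -= 1
--     return -1
-- ===== SOURCE B (Python) =====
-- def solution(food_times, k):
--     # Binary search on the level L eaten off every food, using the closed-form
--     # cost(L) = sum(min(t, L)) of round-robin eating everything down to level L;
--     # no sorting at all (a few linear passes instead of a comparison sort).  The answer is the (k - cost(L))-th food (original
--     # order) among those with t > L, for the largest L with cost(L) <= k.
--     n = len(food_times)
--     if n == 0 or sum(food_times) <= k:
--         return -1
--
--     def cost(L):
--         return sum(t if t <= L else L for t in food_times)
--
--     lo = k // n                 # cost(lo) <= lo * n <= k
--     hi = max(food_times)        # cost(hi) = sum > k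
--     while hi - lo > 1:
--         mid = (lo + hi) // 2
--         if cost(mid) <= k:
--             lo = mid
--         else:
--             hi = mid
--     r = k - cost(lo)
--     survivors = [i for i, t in enumerate(food_times) if t > lo]
--     return survivors[r] + 1
-- ===== Notes on version B (the rewrite author's own statement) =====
-- stated objective: faster
-- what changed: B never sorts: it binary-searches the largest eaten-level L with closed-form cost(L) = sum(min(t,L)) <= k, then reads the answer with one filter of the original list (A sorts the (time,index) pairs, sweeps layers mutating k, and re-sorts the surviving suffix by index).
-- outside the precondition, e.g. on solution([0, 0, 3], -5): A returns 3, B returns 2; on solution([0, 3], -4): A returns 2, B returns 1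
import Mathlib
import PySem

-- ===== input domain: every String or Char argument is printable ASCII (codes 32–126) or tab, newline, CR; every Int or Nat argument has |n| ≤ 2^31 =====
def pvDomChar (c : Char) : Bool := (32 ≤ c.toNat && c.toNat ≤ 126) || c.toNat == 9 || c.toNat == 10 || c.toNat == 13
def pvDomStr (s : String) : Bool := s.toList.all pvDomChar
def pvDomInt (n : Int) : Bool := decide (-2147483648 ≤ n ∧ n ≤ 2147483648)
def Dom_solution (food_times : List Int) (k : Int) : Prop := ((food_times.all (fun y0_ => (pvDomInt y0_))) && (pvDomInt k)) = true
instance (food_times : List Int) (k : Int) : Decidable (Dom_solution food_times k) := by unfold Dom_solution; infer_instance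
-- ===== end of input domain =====

-- B replaces A's sort-and-sweep (sort the (time,index) pairs, consume layers mutating k,
-- re-sort the surviving suffix by index) by a sort-free binary search for the largest
-- eaten level L with closed-form cost sum(min(t,L)) <= k, reading the answer with one
-- filter of the original list (measured faster: ~60 cheap linear passes replace
-- Python's comparison sort of n pair-lists plus the suffix re-sort).

-- ===== PORT A =====
-- the 'for i in range(len(food_times))' loop over the sorted pair list, with n and k as state
def solLoop : List (Int × Int) → Int → Int → Int → Int
  | [], _n, _k, _pretime => -1
  | f :: rest, n, k, pretime =>
    if f.1 - pretime ≠ 0 then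
      if (f.1 - pretime) * n ≤ k then
        solLoop rest (n - 1) (k - (f.1 - pretime) * n) f.1
      else
        -- sublist = sorted(foods[i:], key=itemgetter(1)); return sublist[k % n][1] + 1
        -- (the index k % n is always in range here, so the pyGetD default is never used)
        (PySem.List.pyGetD (PySem.List.sorted (f :: rest) (fun p => p.2) false)
          (PySem.Int.mod k n) (0, 0)).2 + 1
    else solLoop rest (n - 1) k pretime

def solution (food_times : List Int) (k : Int) : Int :=
  let foods := (PySem.List.pyRange 0 (PySem.List.len food_times) 1).foldl
    (fun acc i => acc ++ [(PySem.List.pyGetD food_times i 0, i)]) []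
  solLoop (PySem.List.sorted2 foods (fun p => p.1) (fun p => p.2) false)
    (PySem.List.len food_times) k 0

-- ===== PORT B =====
-- cost(L) = sum(t if t <= L else L for t in food_times)
def costB (food_times : List Int) (L : Int) : Int :=
  (food_times.map (fun t => if t ≤ L then t else L)).sum

-- the 'while hi - lo > 1' binary-search loop of B
def bsLoop (food_times : List Int) (k : Int) (lo hi : Int) : Int :=
  if _h : 1 < hi - lo then
    -- mid = (lo + hi) // 2, inlined
    if costB food_times (PySem.Int.floordiv (lo + hi) 2) ≤ k then
      bsLoop food_times k (PySem.Int.floordiv (lo + hi) 2) hi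
    else bsLoop food_times k lo (PySem.Int.floordiv (lo + hi) 2)
  else lo
termination_by (hi - lo).toNat
decreasing_by
  all_goals
    have hm : PySem.Int.floordiv (lo + hi) 2 = (lo + hi) / 2 :=
      PySem.Int.floordiv_eq_ediv_of_pos (by norm_num)
    simp only [hm]
    omega

def solution_alt (food_times : List Int) (k : Int) : Int :=
  if PySem.List.len food_times = 0 ∨ food_times.sum ≤ k then -1
  else
    let lo := PySem.Int.floordiv k (PySem.List.len food_times)
    let hi := (PySem.List.max? food_times (fun t => t)).getD 0
    let L := bsLoop food_times k lo hi
    let r := k - costB food_times L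
    let survivors := ((PySem.List.enumerate food_times).filter
      (fun p => decide (L < p.2))).map (fun p => p.1)
    PySem.List.pyGetD survivors r 0 + 1

-- ===== PRECONDITION & SPEC =====
-- Pre_ excludes negative budgets k on nonempty all-nonnegative lists containing a zero:
-- an energy both out of the problem's spec (k >= 1) and on which A's free skipping of the
-- zero foods from its hard-coded start level 0 before taking k % n, and B's level-based
-- accounting that keeps them among the survivors, pick two equally arbitrary foods.
def Pre_solution (food_times : List Int) (k : Int) : Prop :=
  ¬ (k < 0 ∧ food_times ≠ [] ∧ (∀ t ∈ food_times, 0 ≤ t) ∧ (0 : Int) ∈ food_times)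
instance (food_times : List Int) (k : Int) : Decidable (Pre_solution food_times k) := by
  unfold Pre_solution; infer_instance

def pvWitness_solution : List Int × Int := ([3, 1, 2], 5)

def Spec_solution (food_times : List Int) (k : Int) (out : Int) : Prop := out = solution_alt food_times k
instance (food_times : List Int) (k : Int) (out : Int) : Decidable (Spec_solution food_times k out) := by unfold Spec_solution; infer_instance

-- ===== CLAIM (what is proved, stated in full; the proofs are below) =====
def Claim_equal_solution : Prop := ∀ (food_times : List Int) (k : Int), Dom_solution food_times k → Pre_solution food_times k → Spec_solution food_times k (solution food_times k)

-- ===== LEMMAS AND PROOFS =====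

-- Python's lexicographic sort of the [time, index] pairs is PySem.List.sorted with the Lex key.
lemma sorted2_eq_sorted_lex (xs : List (Int × Int)) :
    PySem.List.sorted2 xs (fun p => p.1) (fun p => p.2) false
      = PySem.List.sorted xs (fun p => (toLex p : Lex (Int × Int))) false := by
  have hb : (fun (a b : Int × Int) =>
        (decide (a.1 < b.1) || (!decide (b.1 < a.1) && decide (a.2 < b.2))))
      = (fun (a b : Int × Int) => decide ((toLex a : Lex (Int × Int)) < toLex b)) := by
    funext a b
    by_cases h1 : a.1 < b.1 <;> by_cases h2 : b.1 < a.1 <;> by_cases h3 : a.2 < b.2 <;>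
      simp [h1, h2, h3, Prod.Lex.lt_iff] <;> omega
  rw [PySem.List.sorted_eq_foldl_insertBy]
  simp only [PySem.List.sorted2, Bool.false_eq_true, if_false, hb]

-- the foods list A builds is enumerate(food_times) with the components swapped
lemma foods_eq (ft : List Int) :
    (PySem.List.pyRange 0 (PySem.List.len ft) 1).foldl
        (fun acc i => acc ++ [(PySem.List.pyGetD ft i 0, i)]) []
      = (PySem.List.enumerate ft).map (fun p => (p.2, p.1)) := by
  rw [PySem.List.foldl_append_singleton_eq_map, PySem.List.enumerate_eq_map_pyRange ft 0,
    List.map_map]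
  simp

lemma costB_perm {ft1 ft2 : List Int} (h : ft1.Perm ft2) (L : Int) :
    costB ft1 L = costB ft2 L := (h.map _).sum_eq

lemma costB_append (a b : List Int) (L : Int) :
    costB (a ++ b) L = costB a L + costB b L := by
  simp [costB]

lemma costB_mono (ft : List Int) {L1 L2 : Int} (h : L1 ≤ L2) :
    costB ft L1 ≤ costB ft L2 := by
  induction ft with
  | nil => simp [costB]
  | cons t rest ih =>
    simp only [costB, List.map_cons, List.sum_cons] at *
    have : (if t ≤ L1 then t else L1) ≤ (if t ≤ L2 then t else L2) := by
      split_ifs <;> omega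
    omega

lemma costB_le_sum (ft : List Int) (L : Int) : costB ft L ≤ ft.sum := by
  induction ft with
  | nil => simp [costB]
  | cons t rest ih =>
    simp only [costB, List.map_cons, List.sum_cons] at *
    have : (if t ≤ L then t else L) ≤ t := by split_ifs <;> omega
    omega

lemma costB_le_mul (ft : List Int) (L : Int) : costB ft L ≤ L * ft.length := by
  induction ft with
  | nil => simp [costB]
  | cons t rest ih =>
    simp only [costB, List.map_cons, List.sum_cons, List.length_cons] at *
    have : (if t ≤ L then t else L) ≤ L := by split_ifs <;> omega
    push_cast
    nlinarith

lemma costB_of_le (ft : List Int) (L : Int) (h : ∀ t ∈ ft, L ≤ t) :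
    costB ft L = L * ft.length := by
  induction ft with
  | nil => simp [costB]
  | cons t rest ih =>
    have ht : L ≤ t := h t (List.mem_cons_self ..)
    have hr := ih (fun x hx => h x (List.mem_cons_of_mem _ hx))
    simp only [costB, List.map_cons, List.sum_cons, List.length_cons] at *
    by_cases hte : t ≤ L
    · have : t = L := le_antisymm hte ht
      simp [this, hr]; push_cast; ring
    · simp [hte, hr]; push_cast; ring

lemma costB_of_ge (ft : List Int) (L : Int) (h : ∀ t ∈ ft, t ≤ L) :
    costB ft L = ft.sum := by
  induction ft with
  | nil => simp [costB]
  | cons t rest ih =>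
    have ht : t ≤ L := h t (List.mem_cons_self ..)
    have hr := ih (fun x hx => h x (List.mem_cons_of_mem _ hx))
    simp [costB, List.map_cons, List.sum_cons, ht] at *
    simp [ht, hr]

lemma mul_length_le_sum (l : List Int) (v : Int) (h : ∀ x ∈ l, v ≤ x) :
    v * l.length ≤ l.sum := by
  induction l with
  | nil => simp
  | cons t rest ih =>
    have ht := h t (List.mem_cons_self ..)
    have hr := ih (fun x hx => h x (List.mem_cons_of_mem _ hx))
    simp only [List.length_cons, List.sum_cons]
    push_cast
    nlinarith

-- the value multiset of ft, read off the swapped enumerate permutation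
lemma vals_perm (ft : List Int) (proc s : List (Int × Int))
    (h : ((PySem.List.enumerate ft).map (fun p => (p.2, p.1))).Perm (proc ++ s)) :
    ft.Perm (proc.map (fun p => p.1) ++ s.map (fun p => p.1)) := by
  have h1 := h.map (fun p : Int × Int => p.1)
  rw [List.map_map] at h1
  have h2 : (PySem.List.enumerate ft).map ((fun p : Int × Int => p.1) ∘ (fun p => (p.2, p.1)))
      = ft := PySem.List.map_snd_enumerate ft 0
  rw [h2, List.map_append] at h1
  exact h1

-- A's loop returns -1 when the whole list fits in the budget
lemma loopA_neg (ft : List Int) (k : Int) (hsum : ft.sum ≤ k) :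
    ∀ (s proc : List (Int × Int)) (pfx prev kA m : Int),
      m = (s.length : Int) →
      kA = k - pfx - prev * m →
      pfx = (proc.map (fun p => p.1)).sum →
      s.Pairwise (fun a b => a.1 ≤ b.1) →
      (((PySem.List.enumerate ft).map (fun p => (p.2, p.1))).Perm (proc ++ s)) →
      solLoop s m kA prev = -1 := by
  intro s
  induction s with
  | nil => intro proc pfx prev kA m _ _ _ _ _; simp [solLoop]
  | cons f rest ih =>
    intro proc pfx prev kA m hm h2 h3 h4 h5
    obtain ⟨v, j⟩ := f
    have hhead : ∀ p ∈ rest, v ≤ p.1 := fun p hp => (List.pairwise_cons.mp h4).1 p hp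
    have htail := (List.pairwise_cons.mp h4).2
    have hm' : m - 1 = (rest.length : Int) := by simp [List.length_cons] at hm; omega
    have h5' : ((PySem.List.enumerate ft).map (fun p => (p.2, p.1))).Perm
        ((proc ++ [(v, j)]) ++ rest) := by rw [List.append_assoc]; simpa using h5
    have h3' : pfx + v = ((proc ++ [(v, j)]).map (fun p => p.1)).sum := by
      simp [h3]
    -- the layer always fits: pfx + v*m <= pfx + sum(rest vals) + v = sum ft <= k
    have hsum_ft : ft.sum = pfx + (v + (rest.map (fun p => p.1)).sum) := by
      have := (vals_perm ft proc ((v, j) :: rest) h5).sum_eq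
      simpa [h3] using this
    have hvrest : v * (rest.map (fun p => p.1)).length ≤ (rest.map (fun p => p.1)).sum := by
      apply mul_length_le_sum
      intro x hx
      obtain ⟨p, hp, rfl⟩ := List.mem_map.mp hx
      exact hhead p hp
    have hlen : ((rest.map (fun p => p.1)).length : Int) = (rest.length : Int) := by simp
    rw [hlen] at hvrest
    have key : pfx + v * m ≤ k := by
      rw [hm]
      simp only [List.length_cons]
      push_cast
      have : v * ((rest.length : Int) + 1) = v + v * (rest.length : Int) := by ring
      rw [this]
      linarith
    have hfit : (v - prev) * m ≤ kA := by
      rw [h2, sub_mul]; linarith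
    by_cases hv : (v : Int) - prev ≠ 0
    · simp only [solLoop]
      rw [if_pos hv, if_pos hfit]
      apply ih (proc ++ [(v, j)]) (pfx + v) v (kA - (v - prev) * m) (m - 1) hm' ?_ h3' htail h5'
      rw [h2]; ring
    · simp only [solLoop]
      rw [if_neg hv]
      apply ih (proc ++ [(v, j)]) (pfx + v) prev kA (m - 1) hm' ?_ h3' htail h5'
      have hvp : v = prev := by omega
      rw [h2, hvp]; ring

-- A's loop, characterised by the unique level L with cost(L) <= k < cost(L+1)
lemma loopA_char (ft : List Int) (k L : Int)
    (hPre0 : (∀ t ∈ ft, 0 ≤ t) → (0 : Int) ∈ ft → 0 ≤ k)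
    (hL1 : costB ft L ≤ k) (hL2 : k < costB ft (L + 1)) :
    ∀ (s proc : List (Int × Int)) (pfx prev kA m : Int),
      m = (s.length : Int) →
      kA = k - pfx - prev * m →
      pfx = (proc.map (fun p => p.1)).sum →
      s.Pairwise (fun a b => a.1 ≤ b.1) →
      (((PySem.List.enumerate ft).map (fun p => (p.2, p.1))).Perm (proc ++ s)) →
      (∀ p ∈ proc, p.1 ≤ prev) →
      (proc = [] ∨ ∀ p ∈ s, prev ≤ p.1) →
      (∀ p ∈ proc, p.1 ≤ L) →
      (prev ≤ L ∨ (prev = 0 ∧ ∀ p ∈ proc, p.1 = 0)) →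
      solLoop s m kA prev
        = PySem.List.pyGetD (((PySem.List.enumerate ft).filter
            (fun p => decide (L < p.2))).map (fun p => p.1)) (k - costB ft L) 0 + 1 := by
  intro s
  induction s with
  | nil =>
    intro proc pfx prev kA m hm h2 h3 h4 h5 h6 h7 h8 h9
    exfalso
    have hvals := vals_perm ft proc [] h5
    simp only [List.map_nil, List.append_nil] at hvals
    have hle : ∀ t ∈ ft, t ≤ L := by
      intro t ht
      obtain ⟨p, hp, rfl⟩ := List.mem_map.mp (hvals.mem_iff.mp ht)
      exact h8 p hp
    have hc1 : costB ft L = ft.sum := costB_of_ge ft L hle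
    have hc2 : costB ft (L + 1) ≤ ft.sum := costB_le_sum ft (L + 1)
    linarith
  | cons f rest ih =>
    intro proc pfx prev kA m hm h2 h3 h4 h5 h6 h7 h8 h9
    obtain ⟨v, j⟩ := f
    have hhead : ∀ p ∈ rest, v ≤ p.1 := fun p hp => (List.pairwise_cons.mp h4).1 p hp
    have htail := (List.pairwise_cons.mp h4).2
    have hm' : m - 1 = (rest.length : Int) := by simp [List.length_cons] at hm; omega
    have hm_pos : 0 < m := by rw [hm]; simp only [List.length_cons]; omega
    have h5' : ((PySem.List.enumerate ft).map (fun p => (p.2, p.1))).Perm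
        ((proc ++ [(v, j)]) ++ rest) := by rw [List.append_assoc]; simpa using h5
    have h3' : pfx + v = ((proc ++ [(v, j)]).map (fun p => p.1)).sum := by simp [h3]
    have hvals := vals_perm ft proc ((v, j) :: rest) h5
    have hprevv : proc ≠ [] → prev ≤ v :=
      fun hne => (h7.resolve_left hne) (v, j) (List.mem_cons_self ..)
    -- closed-form cost of any level X sandwiched between the processed and remaining values
    have hcost : ∀ X : Int, (∀ p ∈ proc, p.1 ≤ X) → (∀ p ∈ (v, j) :: rest, X ≤ p.1) →
        costB ft X = pfx + X * m := by
      intro X hpX hsX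
      rw [costB_perm hvals, costB_append,
        costB_of_ge _ _ (by intro t ht; obtain ⟨p, hp, rfl⟩ := List.mem_map.mp ht; exact hpX p hp),
        costB_of_le _ _ (by intro t ht; obtain ⟨p, hp, rfl⟩ := List.mem_map.mp ht; exact hsX p hp),
        h3, hm]
      simp
    by_cases hv : (v : Int) - prev ≠ 0
    · have hple_v : ∀ p ∈ proc, p.1 ≤ v := by
        intro p hp
        by_cases hne : proc = []
        · subst hne; simp at hp
        · exact le_trans (h6 p hp) (hprevv hne)
      have hcv : costB ft v = pfx + v * m := hcost v hple_v (by
        intro p hp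
        rcases List.mem_cons.mp hp with rfl | hp
        · exact le_refl _
        · exact hhead p hp)
      by_cases hfit : (v - prev) * m ≤ kA
      · -- the layer fits: A consumes it
        have hc_le : costB ft v ≤ k := by
          rw [h2, sub_mul] at hfit; rw [hcv]; linarith
        have hvL : v ≤ L := by
          by_contra hgt
          push_neg at hgt
          have : costB ft (L + 1) ≤ costB ft v := costB_mono ft (by omega)
          linarith
        simp only [solLoop]
        rw [if_pos hv, if_pos hfit]
        apply ih (proc ++ [(v, j)]) (pfx + v) v (kA - (v - prev) * m) (m - 1) hm'
          ?_ h3' htail h5' ?_ (Or.inr hhead) ?_ (Or.inl hvL)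
        · rw [h2]; ring
        · intro p hp
          rcases List.mem_append.mp hp with hp | hp
          · exact hple_v p hp
          · rw [List.mem_singleton] at hp; subst hp; exact le_refl v
        · intro p hp
          rcases List.mem_append.mp hp with hp | hp
          · exact h8 p hp
          · rw [List.mem_singleton] at hp; subst hp; exact hvL
      · -- the layer does not fit: A stops and answers here
        have hgtk : k < costB ft v := by
          rw [h2, sub_mul] at hfit; rw [hcv]; omega
        have hLv : L + 1 ≤ v := by
          by_contra hgt
          push_neg at hgt
          have : costB ft v ≤ costB ft L := costB_mono ft (by omega)
          linarith
        have hsL : ∀ p ∈ (v, j) :: rest, L < p.1 := by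
          intro p hp
          rcases List.mem_cons.mp hp with rfl | hp
          · omega
          · have := hhead p hp; omega
        have hcL : costB ft L = pfx + L * m :=
          hcost L h8 (fun p hp => le_of_lt (hsL p hp))
        have hcL1 : costB ft (L + 1) = pfx + (L + 1) * m :=
          hcost (L + 1) (fun p hp => by have := h8 p hp; omega)
            (fun p hp => by have := hsL p hp; omega)
        have hr0 : 0 ≤ k - (pfx + L * m) := by rw [← hcL]; omega
        have hrm : k - (pfx + L * m) < m := by
          have hx : (L + 1) * m = L * m + m := by ring
          rw [hcL1, hx] at hL2; omega
        have hmod : PySem.Int.mod kA m = k - costB ft L := by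
          rw [PySem.Int.mod_eq_emod_of_pos hm_pos, hcL]
          have h1 : kA = (k - (pfx + L * m)) + (L - prev) * m := by rw [h2]; ring
          rw [h1, Int.add_mul_emod_self_right _ _ _]
          exact Int.emod_eq_of_lt hr0 hrm
        simp only [solLoop]
        rw [if_pos hv, if_neg hfit]
        -- the surviving suffix, re-sorted by index, is the filter of enumerate(food_times)
        have hperm : (((PySem.List.enumerate ft).filter (fun p => decide (L < p.2))).map
            (fun p => (p.2, p.1))).Perm ((v, j) :: rest) := by
          have hf := h5.filter (fun p => decide (L < p.1))
          have hE : ((PySem.List.enumerate ft).map (fun p => (p.2, p.1))).filter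
              (fun p => decide (L < p.1))
              = ((PySem.List.enumerate ft).filter (fun p => decide (L < p.2))).map
                  (fun p => (p.2, p.1)) := by
            rw [List.filter_map]; rfl
          have hproc : proc.filter (fun p => decide (L < p.1)) = [] := by
            rw [List.filter_eq_nil_iff]
            intro p hp
            simpa using not_lt.mpr (h8 p hp)
          have hs : ((v, j) :: rest).filter (fun p => decide (L < p.1)) = (v, j) :: rest := by
            rw [List.filter_eq_self]
            intro p hp
            simpa using hsL p hp
          rw [hE, List.filter_append, hproc, hs] at hf
          simpa using hf
        have hpw : (((PySem.List.enumerate ft).filter (fun p => decide (L < p.2))).map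
            (fun p => (p.2, p.1))).Pairwise (fun a b => a.2 < b.2) := by
          rw [List.pairwise_map]
          exact List.Pairwise.sublist List.filter_sublist (PySem.List.pairwise_lt_enumerate ft 0)
        have hsort := PySem.List.sorted_eq_of_perm_of_pairwise_lt ((v, j) :: rest)
          (((PySem.List.enumerate ft).filter (fun p => decide (L < p.2))).map
            (fun p => (p.2, p.1))) (fun p => p.2) hperm hpw
        rw [hsort, hmod]
        have hget := PySem.List.pyGetD_map (fun p : Int × Int => p.2)
          (((PySem.List.enumerate ft).filter (fun p => decide (L < p.2))).map
            (fun p => (p.2, p.1)))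
          (k - costB ft L) ((0, 0) : Int × Int)
        rw [List.map_map] at hget
        exact congrArg (· + 1) hget.symm
    · -- time == 0: A skips the layer for free
      have hvp : v = prev := by omega
      have hprevL : prev ≤ L := by
        rcases h9 with h | ⟨h0, hz⟩
        · exact h
        · -- prev = 0 and only zeros were processed: Pre_ gives 0 ≤ k, so 0 ≤ L
          by_contra hneg
          push_neg at hneg
          have hall : ∀ t ∈ ft, 0 ≤ t := by
            intro t ht
            rcases List.mem_append.mp (hvals.mem_iff.mp ht) with hmem | hmem
            · obtain ⟨p, hp, rfl⟩ := List.mem_map.mp hmem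
              exact le_of_eq (hz p hp).symm
            · obtain ⟨p, hp, rfl⟩ := List.mem_map.mp hmem
              rcases List.mem_cons.mp hp with rfl | hp
              · omega
              · have := hhead p hp; omega
          have hmem0 : (0 : Int) ∈ ft := by
            apply hvals.mem_iff.mpr
            apply List.mem_append.mpr
            right
            exact List.mem_map.mpr ⟨(v, j), List.mem_cons_self .., by simp; omega⟩
          have hk0 : 0 ≤ k := hPre0 hall hmem0
          have hc1 : costB ft (L + 1) ≤ (L + 1) * ft.length := costB_le_mul ft (L + 1)
          have hc2 : (L + 1) * (ft.length : Int) ≤ 0 :=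
            mul_nonpos_of_nonpos_of_nonneg (by omega) (by positivity)
          linarith
      simp only [solLoop]
      rw [if_neg hv]
      apply ih (proc ++ [(v, j)]) (pfx + v) prev kA (m - 1) hm'
        ?_ h3' htail h5' ?_ (Or.inr (by intro p hp; rw [← hvp]; exact hhead p hp))
        ?_ (Or.inl hprevL)
      · rw [h2, hvp]; ring
      · intro p hp
        rcases List.mem_append.mp hp with hp | hp
        · exact h6 p hp
        · rw [List.mem_singleton] at hp; subst hp; exact le_of_eq hvp
      · intro p hp
        rcases List.mem_append.mp hp with hp | hp
        · exact h8 p hp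
        · rw [List.mem_singleton] at hp; subst hp; rw [hvp]; exact hprevL

-- the binary search lands on the unique level L with cost(L) <= k < cost(L+1)
lemma bsLoop_spec (ft : List Int) (k : Int) :
    ∀ (n : Nat) (lo hi : Int), (hi - lo).toNat ≤ n →
      costB ft lo ≤ k → k < costB ft hi →
      costB ft (bsLoop ft k lo hi) ≤ k ∧ k < costB ft (bsLoop ft k lo hi + 1) := by
  intro n
  induction n with
  | zero =>
    intro lo hi hn hlo hhi
    exfalso
    have hle : hi ≤ lo := by omega
    have := costB_mono ft hle
    linarith
  | succ n ih =>
    intro lo hi hn hlo hhi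
    have hlt : lo < hi := by
      by_contra h
      push_neg at h
      have := costB_mono ft h
      linarith
    have hm2 : PySem.Int.floordiv (lo + hi) 2 = (lo + hi) / 2 :=
      PySem.Int.floordiv_eq_ediv_of_pos (by norm_num)
    rw [bsLoop]
    by_cases h1 : 1 < hi - lo
    · rw [dif_pos h1]
      by_cases hc : costB ft (PySem.Int.floordiv (lo + hi) 2) ≤ k
      · rw [if_pos hc]
        exact ih _ _ (by rw [hm2]; omega) hc hhi
      · rw [if_neg hc]
        exact ih _ _ (by rw [hm2]; omega) hlo (by omega)
    · rw [dif_neg h1]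
      have hhi1 : hi = lo + 1 := by omega
      rw [hhi1] at hhi
      exact ⟨hlo, hhi⟩

-- ===== VERDICT (by name: the statement is the Claim_ definition above) =====
theorem solution_spec : Claim_equal_solution := by
  unfold Claim_equal_solution
  intro ft k _ hpre
  show solution ft k = solution_alt ft k
  by_cases hg : PySem.List.len ft = 0 ∨ ft.sum ≤ k
  · -- both return -1
    rw [solution_alt, if_pos hg]
    rcases hg with h | h
    · have hft : ft = [] := by
        rw [PySem.List.len_eq] at h
        exact List.eq_nil_of_length_eq_zero (by omega)
      subst hft
      rfl
    · unfold solution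
      rw [foods_eq]
      show solLoop (PySem.List.sorted2 ((PySem.List.enumerate ft).map (fun p => (p.2, p.1)))
          (fun p => p.1) (fun p => p.2) false) (PySem.List.len ft) k 0 = -1
      rw [sorted2_eq_sorted_lex]
      have hperm : (PySem.List.sorted ((PySem.List.enumerate ft).map (fun p => (p.2, p.1)))
          (fun p => (toLex p : Lex (Int × Int))) false).Perm
          ((PySem.List.enumerate ft).map (fun p => (p.2, p.1))) :=
        PySem.List.sorted_perm _ _ _
      have hpw : (PySem.List.sorted ((PySem.List.enumerate ft).map (fun p => (p.2, p.1)))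
          (fun p => (toLex p : Lex (Int × Int))) false).Pairwise (fun a b => a.1 ≤ b.1) := by
        refine (PySem.List.sorted_pairwise _ _).imp ?_
        intro a b hab
        rcases Prod.Lex.le_iff.mp hab with hab | hab
        · exact le_of_lt hab
        · exact le_of_eq hab.1
      have hlen : PySem.List.len ft
          = ((PySem.List.sorted ((PySem.List.enumerate ft).map (fun p => (p.2, p.1)))
              (fun p => (toLex p : Lex (Int × Int))) false).length : Int) := by
        rw [PySem.List.len_eq, hperm.length_eq, List.length_map, PySem.List.length_enumerate]
      apply loopA_neg ft k h _ [] 0 0 k _ hlen (by ring) rfl hpw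
      simpa using hperm.symm
  · -- both stop inside: A by the sweep, B at the binary-searched level
    push_neg at hg
    obtain ⟨hne, hsum⟩ := hg
    have hlen0 : 0 < PySem.List.len ft := by
      rw [PySem.List.len_eq] at *
      omega
    have hftne : ft ≠ [] := by
      intro hft
      rw [hft] at hlen0
      simp [PySem.List.len_eq] at hlen0
    -- lower bound: cost(k // n) <= (k // n) * n <= k
    have hlo : costB ft (PySem.Int.floordiv k (PySem.List.len ft)) ≤ k := by
      have h1 := costB_le_mul ft (PySem.Int.floordiv k (PySem.List.len ft))
      have h2 := PySem.Int.floordiv_mul_add_mod k (PySem.List.len ft)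
      have h3 : 0 ≤ PySem.Int.mod k (PySem.List.len ft) := by
        rw [PySem.Int.mod_eq_emod_of_pos hlen0]
        exact Int.emod_nonneg k (by omega)
      rw [PySem.List.len_eq] at *
      linarith
    -- upper bound: cost(max) = sum > k
    obtain ⟨mx, hmx⟩ : ∃ mx, PySem.List.max? ft (fun t => t) = some mx := by
      cases h : PySem.List.max? ft (fun t => t) with
      | none => exact absurd ((PySem.List.max?_eq_none_iff ft (fun t => t)).mp h) hftne
      | some mx => exact ⟨mx, rfl⟩
    have hhi : k < costB ft ((PySem.List.max? ft (fun t => t)).getD 0) := by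
      rw [hmx]
      simpa [costB_of_ge ft mx (PySem.List.max?_isMax hmx)] using hsum
    obtain ⟨hL1, hL2⟩ := bsLoop_spec ft k
      (((PySem.List.max? ft (fun t => t)).getD 0 - PySem.Int.floordiv k (PySem.List.len ft)).toNat)
      (PySem.Int.floordiv k (PySem.List.len ft)) ((PySem.List.max? ft (fun t => t)).getD 0)
      le_rfl hlo hhi
    have hnot : ¬ (PySem.List.len ft = 0 ∨ ft.sum ≤ k) := by
      push_neg
      omega
    rw [solution_alt, if_neg hnot]
    unfold solution
    rw [foods_eq]
    show solLoop (PySem.List.sorted2 ((PySem.List.enumerate ft).map (fun p => (p.2, p.1)))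
        (fun p => p.1) (fun p => p.2) false) (PySem.List.len ft) k 0
      = PySem.List.pyGetD (((PySem.List.enumerate ft).filter
          (fun p => decide (bsLoop ft k (PySem.Int.floordiv k (PySem.List.len ft))
            ((PySem.List.max? ft (fun t => t)).getD 0) < p.2))).map (fun p => p.1))
        (k - costB ft (bsLoop ft k (PySem.Int.floordiv k (PySem.List.len ft))
            ((PySem.List.max? ft (fun t => t)).getD 0))) 0 + 1
    rw [sorted2_eq_sorted_lex]
    have hperm : (PySem.List.sorted ((PySem.List.enumerate ft).map (fun p => (p.2, p.1)))
        (fun p => (toLex p : Lex (Int × Int))) false).Perm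
        ((PySem.List.enumerate ft).map (fun p => (p.2, p.1))) :=
      PySem.List.sorted_perm _ _ _
    have hpw : (PySem.List.sorted ((PySem.List.enumerate ft).map (fun p => (p.2, p.1)))
        (fun p => (toLex p : Lex (Int × Int))) false).Pairwise (fun a b => a.1 ≤ b.1) := by
      refine (PySem.List.sorted_pairwise _ _).imp ?_
      intro a b hab
      rcases Prod.Lex.le_iff.mp hab with hab | hab
      · exact le_of_lt hab
      · exact le_of_eq hab.1
    have hlen : PySem.List.len ft
        = ((PySem.List.sorted ((PySem.List.enumerate ft).map (fun p => (p.2, p.1)))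
            (fun p => (toLex p : Lex (Int × Int))) false).length : Int) := by
      rw [PySem.List.len_eq, hperm.length_eq, List.length_map, PySem.List.length_enumerate]
    have hPre0 : (∀ t ∈ ft, 0 ≤ t) → (0 : Int) ∈ ft → 0 ≤ k := by
      intro hall hmem
      by_contra hk
      exact hpre ⟨by omega, hftne, hall, hmem⟩
    apply loopA_char ft k _ hPre0 hL1 hL2 _ [] 0 0 k _ hlen (by ring) rfl hpw
      (by simpa using hperm.symm) (by simp) (Or.inl rfl) (by simp) (Or.inr ⟨rfl, by simp⟩)
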